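-- pv_equiv track=rewrite | github.com/unt-libraries/django-nomination | nomination/feeds.py | no_dup_dict
-- ===== SOURCE A (Python) =====
-- def no_dup_dict(url_set):
--     """Create a dictionary from list of lists.
--
--     This function expects a list of 2-tuples of the form (key, value),
--     where key becomes the dictionary key and value becomes the associated
--     value. In the event that there are more than 1 2-tuples with the same
--     key, no entries are made into the dictionary.
--     """
--     attr_dict = {}
--     del_list = []
--     for entity, attribute in url_set:
--         if entity in attr_dict:
--             del_list.append(entity)
--         else:
--             attr_dict[entity] = attribute
--     # For all the entities that had duplicates, delete the dict entry.
--     for entity in set(del_list):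
--         del(attr_dict[entity])
--     return attr_dict
-- ===== SOURCE B (Python) =====
-- def no_dup_dict(url_set):
--     """Create a dictionary from list of lists.
--
--     Count the occurrences of each key first, then keep exactly the
--     pairs whose key occurs once.
--     """
--     items = list(url_set)
--     counts = {}
--     for entity, attribute in items:
--         counts[entity] = counts.get(entity, 0) + 1
--     return {entity: attribute for entity, attribute in items if counts[entity] == 1}
-- ===== Notes on version B (the rewrite author's own statement) =====
-- stated objective: simpler
-- what changed: Replaces the build-then-delete-duplicates strategy (dict + del_list + deletion pass over set(del_list)) with a count-then-filter strategy: count each key once, then build the result in a single comprehension keeping keys with count 1.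
import Mathlib
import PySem

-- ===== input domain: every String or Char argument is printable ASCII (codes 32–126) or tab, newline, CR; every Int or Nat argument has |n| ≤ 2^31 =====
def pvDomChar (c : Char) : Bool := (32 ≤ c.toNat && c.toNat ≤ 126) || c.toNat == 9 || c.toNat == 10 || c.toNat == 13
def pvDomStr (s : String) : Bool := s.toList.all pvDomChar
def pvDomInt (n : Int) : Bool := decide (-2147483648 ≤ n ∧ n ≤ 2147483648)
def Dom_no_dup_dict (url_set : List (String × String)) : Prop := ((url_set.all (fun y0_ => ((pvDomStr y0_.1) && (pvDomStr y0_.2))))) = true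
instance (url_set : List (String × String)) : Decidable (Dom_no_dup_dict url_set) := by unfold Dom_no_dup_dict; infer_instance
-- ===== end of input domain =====

-- B replaces A's build-then-delete-duplicates strategy (dict + del_list + deletion pass)
-- with a count-then-filter strategy (count keys once, keep the pairs whose key occurs once).


-- ===== PORT A =====
-- the loop body: 'if entity in attr_dict: del_list.append(entity) else: attr_dict[entity] = attribute'
def noDupStepA (st : PySem.Dict String String × List String) (p : String × String) :
    PySem.Dict String String × List String :=
  if st.1.contains p.1 then (st.1, st.2 ++ [p.1]) else (st.1.insert p.1 p.2, st.2)

def no_dup_dict (url_set : List (String × String)) : List (String × String) :=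
  let st := url_set.foldl noDupStepA (PySem.Dict.empty, [])
  -- 'for entity in set(del_list): del(attr_dict[entity])' — the resulting dict does not
  -- depend on the (hash) iteration order of the set, so folding in Set order is exact
  ((PySem.Set.ofList st.2).foldl (fun d e => d.erase e) st.1).items

-- ===== PORT B =====
def no_dup_dict_alt (url_set : List (String × String)) : List (String × String) :=
  let counts := url_set.foldl
      (fun (c : PySem.Dict String Int) p => c.insert p.1 (c.getD p.1 0 + 1))
      PySem.Dict.empty
  url_set.filter (fun p => counts.getD p.1 0 == 1)

-- ===== PRECONDITION & SPEC =====
def Spec_no_dup_dict (url_set : List (String × String)) (out : List (String × String)) : Prop := out = no_dup_dict_alt url_set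
instance (url_set : List (String × String)) (out : List (String × String)) : Decidable (Spec_no_dup_dict url_set out) := by unfold Spec_no_dup_dict; infer_instance

-- ===== CLAIM (what is proved, stated in full; the proofs are below) =====
def Claim_equal_no_dup_dict : Prop := ∀ (url_set : List (String × String)), Dom_no_dup_dict url_set → Spec_no_dup_dict url_set (no_dup_dict url_set)

-- ===== LEMMAS AND PROOFS =====

-- keys of A's attr_dict after the loop: the distinct keys seen, in first-occurrence order
lemma foldA_keys (l : List (String × String)) (d : PySem.Dict String String) (dl : List String) :
    (l.foldl noDupStepA (d, dl)).1.keys = PySem.Set.update d.keys (l.map (·.1)) := by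
  induction l generalizing d dl with
  | nil => rfl
  | cons p t ih =>
    simp only [List.foldl_cons, List.map_cons, PySem.Set.update_cons, noDupStepA]
    by_cases hc : d.contains p.1 = true
    · rw [if_pos hc, ih, PySem.Set.add_of_mem ((PySem.Dict.contains_iff_mem_keys d p.1).mp hc)]
    · rw [if_neg hc, ih, PySem.Dict.keys_insert_of_not_contains _ _ (by simpa using hc),
        PySem.Set.add_of_not_mem (fun hm => hc ((PySem.Dict.contains_iff_mem_keys d p.1).mpr hm))]

-- lookups in A's attr_dict after the loop: the first value for the key wins
lemma foldA_get? (l : List (String × String)) (d : PySem.Dict String String) (dl : List String)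
    (k : String) :
    (l.foldl noDupStepA (d, dl)).1.get? k
      = (d.get? k).or ((l.find? (fun p => p.1 == k)).map (·.2)) := by
  induction l generalizing d dl with
  | nil => simp
  | cons p t ih =>
    simp only [List.foldl_cons, noDupStepA, List.find?_cons]
    by_cases hc : d.contains p.1 = true
    · rw [if_pos hc, ih]
      by_cases hk : p.1 = k
      · subst hk
        obtain ⟨v, hv⟩ : ∃ v, d.get? p.1 = some v := by
          have := PySem.Dict.contains_eq_isSome_get? (d := d) (k := p.1)
          rw [hc] at this
          exact Option.isSome_iff_exists.mp this.symm
        simp [hv]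
      · simp [beq_eq_false_iff_ne.mpr hk]
    · rw [if_neg hc, ih]
      by_cases hk : p.1 = k
      · subst hk
        have hn : d.get? p.1 = none := by
          rw [PySem.Dict.get?_eq_none_iff_contains]; simpa using hc
        simp [hn, PySem.Dict.get?_insert_self]
      · simp [beq_eq_false_iff_ne.mpr hk, PySem.Dict.get?_insert_of_ne _ _ (Ne.symm hk)]

-- membership in A's del_list after the loop
lemma foldA_del_mem (l : List (String × String)) (d : PySem.Dict String String) (dl : List String)
    (k : String) :
    (k ∈ (l.foldl noDupStepA (d, dl)).2)
      ↔ k ∈ dl ∨ (d.contains k = true ∧ k ∈ l.map (·.1)) ∨ 2 ≤ (l.map (·.1)).count k := by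
  induction l generalizing d dl with
  | nil => simp
  | cons p t ih =>
    simp only [List.foldl_cons, noDupStepA, List.map_cons]
    by_cases hc : d.contains p.1 = true
    · rw [if_pos hc, ih]
      by_cases hk : k = p.1
      · subst hk
        simp [hc, List.count_cons_self]
      · simp [List.mem_append, hk, Ne.symm hk]
    · rw [if_neg hc, ih]
      by_cases hk : k = p.1
      · subst hk
        have hmem : 2 ≤ List.count p.1 (t.map (·.1)) → ∃ x, (p.1, x) ∈ t := by
          intro h
          have : p.1 ∈ t.map (·.1) := List.count_pos_iff.mp (by omega)
          simpa using this
        simp [PySem.Dict.contains_insert_self, List.count_cons_self, hc]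
        constructor
        · rintro (h | h | h)
          exacts [Or.inl h, Or.inr h, Or.inr (hmem h)]
        · rintro (h | h)
          exacts [Or.inl h, Or.inr (Or.inl h)]
      · simp [PySem.Dict.contains_insert, beq_eq_false_iff_ne.mpr hk, hk, Ne.symm hk]

-- A's deletion pass, as a filter on the items
lemma eraseAll_items (s : List String) (d : PySem.Dict String String) :
    (s.foldl (fun d e => d.erase e) d).items
      = d.items.filter (fun p => !s.contains p.1) := by
  induction s generalizing d with
  | nil => simp
  | cons e t ih =>
    rw [List.foldl_cons, ih]
    have he : (d.erase e).items = d.items.filter (fun p => !(p.1 == e)) := rfl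
    rw [he, List.filter_filter]
    refine List.filter_congr ?_
    intro p _
    simp [Bool.not_or, Bool.and_comm, Bool.beq_eq_decide_eq]

-- the distinct keys filtered by a unique-key predicate, each paired with its first value,
-- is the same list as the original pairs filtered by that predicate
lemma bridge (l : List (String × String)) (P : String → Bool)
    (h : ∀ k, P k = true → (l.map (·.1)).count k ≤ 1) :
    ((PySem.Set.ofList (l.map (·.1))).filter P).map
        (fun k => (k, (((l.find? (fun p => p.1 == k)).map (·.2)).getD "")))
      = l.filter (fun p => P p.1) := by
  induction l with
  | nil => simp [PySem.Set.ofList_nil]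
  | cons p t ih =>
    have ht : ∀ k, P k = true → (t.map (·.1)).count k ≤ 1 := by
      intro k hk
      have := h k hk
      simp only [List.map_cons] at this
      simp only [List.count_cons] at this
      split at this <;> omega
    rw [List.map_cons, PySem.Set.ofList_cons]
    by_cases hP : P p.1 = true
    · -- p.1 occurs exactly once, so it is not a key of t
      have hnt : p.1 ∉ t.map (·.1) := by
        intro hm
        have := h p.1 hP
        have h1 := List.count_pos_iff.mpr hm
        simp only [List.map_cons, List.count_cons_self] at this
        omega
      have hdis : (PySem.Set.ofList (t.map (·.1))).discard p.1 = PySem.Set.ofList (t.map (·.1)) := by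
        refine List.filter_eq_self.mpr ?_
        intro y hy
        have hyt : y ∈ t.map (·.1) := (PySem.Set.mem_ofList _ _).mp hy
        have hne : y ≠ p.1 := fun he => hnt (he ▸ hyt)
        simp [hne]
      have e1 : List.filter P (p.1 :: PySem.Set.ofList (t.map (·.1))) = p.1 :: List.filter P (PySem.Set.ofList (t.map (·.1))) := List.filter_cons_of_pos hP
      have e2 : List.filter (fun q => P q.1) (p :: t) = p :: List.filter (fun q => P q.1) t := List.filter_cons_of_pos (by simpa using hP)
      rw [hdis, e1, e2, List.map_cons]
      congr 1
      · simp
      rw [← ih ht]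
      refine List.map_congr_left ?_
      intro k hk
      have hkt : k ∈ t.map (·.1) := (PySem.Set.mem_ofList _ _).mp (List.mem_of_mem_filter hk)
      have hne : p.1 ≠ k := fun he => hnt (he ▸ hkt)
      simp [beq_eq_false_iff_ne.mpr hne]
    · have hPf : P p.1 = false := by simpa using hP
      rw [List.filter_cons_of_neg (by simp [hPf]), List.filter_cons_of_neg (by simp [hPf])]
      have hfd : ((PySem.Set.ofList (t.map (·.1))).discard p.1).filter P
          = (PySem.Set.ofList (t.map (·.1))).filter P := by
        show (List.filter (fun y => !y == p.1) _).filter P = _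
        rw [List.filter_filter]
        refine List.filter_congr ?_
        intro y _
        by_cases hy : P y = true
        · have : y ≠ p.1 := fun he => by rw [he, hPf] at hy; cases hy
          simp [hy, beq_eq_false_iff_ne.mpr this]
        · simp [Bool.not_eq_true] at hy
          simp [hy]
      rw [hfd, ← ih ht]
      refine List.map_congr_left ?_
      intro k hk
      have hPk : P k = true := List.of_mem_filter hk
      have hne : p.1 ≠ k := fun he => by rw [← he, hPf] at hPk; cases hPk
      simp [beq_eq_false_iff_ne.mpr hne]

-- B computes the key counts of the whole list
lemma altB_counts (l : List (String × String)) (k : String) :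
    (l.foldl (fun (c : PySem.Dict String Int) p => c.insert p.1 (c.getD p.1 0 + 1))
        PySem.Dict.empty).getD k 0
      = ((l.map (·.1)).count k : Int) := by
  rw [← List.foldl_map (f := fun p : String × String => p.1)
      (g := fun (c : PySem.Dict String Int) x => c.insert x (c.getD x 0 + 1)),
    PySem.Dict.getD_foldl_insert_add_one]
  simp

-- B, rephrased with the count written out
lemma altB_filter (l : List (String × String)) :
    no_dup_dict_alt l = l.filter (fun p => (l.map (·.1)).count p.1 == 1) := by
  unfold no_dup_dict_alt
  refine List.filter_congr ?_
  intro p _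
  rw [altB_counts l p.1]
  simp [Bool.beq_eq_decide_eq]

-- A, rephrased: unique keys in first-occurrence order, each with its first value
lemma a_char (l : List (String × String)) :
    no_dup_dict l
      = ((PySem.Set.ofList (l.map (·.1))).filter (fun k => (l.map (·.1)).count k == 1)).map
          (fun k => (k, (((l.find? (fun p => p.1 == k)).map (·.2)).getD ""))) := by
  unfold no_dup_dict
  rw [eraseAll_items]
  have hkeys : (l.foldl noDupStepA (PySem.Dict.empty, [])).1.keys
      = PySem.Set.ofList (l.map (·.1)) := by
    rw [foldA_keys, PySem.Dict.keys_empty]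
    exact PySem.Set.update_empty _
  have hnd : (l.foldl noDupStepA (PySem.Dict.empty, [])).1.keys.Nodup := by
    rw [hkeys]; exact PySem.Set.nodup_ofList _
  rw [PySem.Dict.items_eq_map_keys _ hnd "", hkeys, List.filter_map]
  simp only [Function.comp_def]
  have hget : ∀ k : String,
      (l.foldl noDupStepA (PySem.Dict.empty, [])).1.getD k ""
        = ((l.find? (fun p => p.1 == k)).map (·.2)).getD "" := by
    intro k
    rw [PySem.Dict.getD_eq_get?_getD, foldA_get?]
    simp
  have hdel : ∀ k : String,
      k ∈ (l.foldl noDupStepA (PySem.Dict.empty, [])).2 ↔ 2 ≤ (l.map (·.1)).count k := by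
    intro k
    rw [foldA_del_mem]
    simp
  have hpred : ∀ k ∈ PySem.Set.ofList (l.map (·.1)),
      (!List.contains (PySem.Set.ofList (l.foldl noDupStepA (PySem.Dict.empty, [])).2) k)
        = ((l.map (·.1)).count k == 1) := by
    intro k hk
    have h1 : 1 ≤ (l.map (·.1)).count k :=
      List.count_pos_iff.mpr ((PySem.Set.mem_ofList _ _).mp hk)
    by_cases h2 : 2 ≤ (l.map (·.1)).count k
    · have hm : k ∈ PySem.Set.ofList (l.foldl noDupStepA (PySem.Dict.empty, [])).2 :=
        (PySem.Set.mem_ofList _ _).mpr ((hdel k).mpr h2)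
      have hct : List.contains (PySem.Set.ofList (l.foldl noDupStepA (PySem.Dict.empty, [])).2) k = true := by
        simp [hm]
      rw [hct, beq_eq_false_iff_ne.mpr (by omega : (l.map (·.1)).count k ≠ 1)]
      rfl
    · have hm : k ∉ PySem.Set.ofList (l.foldl noDupStepA (PySem.Dict.empty, [])).2 :=
        fun hm => h2 ((hdel k).mp ((PySem.Set.mem_ofList _ _).mp hm))
      have hct : List.contains (PySem.Set.ofList (l.foldl noDupStepA (PySem.Dict.empty, [])).2) k = false := by
        simp [hm]
      rw [hct, beq_iff_eq.mpr (by omega : (l.map (·.1)).count k = 1)]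
      rfl
  rw [List.filter_congr (fun k hk => hpred k hk)]
  refine List.map_congr_left ?_
  intro k _
  rw [hget k]

-- ===== VERDICT (by name: the statement is the Claim_ definition above) =====
theorem no_dup_dict_spec : Claim_equal_no_dup_dict := by
  intro l _hdom
  show no_dup_dict l = no_dup_dict_alt l
  rw [a_char, altB_filter]
  exact bridge l (fun k => (l.map (·.1)).count k == 1)
    (fun k hk => le_of_eq (beq_iff_eq.mp hk))
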